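-- pv_equiv track=rewrite | github.com/justDabuK/advent-of-code | 2021/16.py | get_resulting_number
-- ===== SOURCE A (Python) =====
-- def get_resulting_number(literal_string):
--     resulting_number_string = ""
--     next_byte = literal_string[:5]
--     literal_string = literal_string[5:]
--     while next_byte[0] == "1":
--         resulting_number_string += next_byte[1:]
--         next_byte = literal_string[:5]
--         literal_string = literal_string[5:]
--     # the last bit should also go into the resulting_number string
--     resulting_number_string += next_byte[1:]
--     return resulting_number_string, literal_string
-- ===== SOURCE B (Python) =====
-- def get_resulting_number(literal_string):
--     # pass 1: find the index k of the first 5-bit group that starts with "0"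
--     k = 0
--     while literal_string[5 * k] == "1":
--         k += 1
--     # pass 2: payload = data bits of groups 0..k; remainder = everything after group k
--     payload = "".join(literal_string[5 * i + 1:5 * i + 5] for i in range(k + 1))
--     return payload, literal_string[5 * (k + 1):]
-- ===== Notes on version B (the rewrite author's own statement) =====
-- stated objective: alternative
-- what changed: A interleaves finding the terminating group and accumulating the payload in one while loop over a shrinking string; B first scans indices 5k to locate the terminating group, then builds the payload in a second pass by joining the groups' data slices.
import Mathlib
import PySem

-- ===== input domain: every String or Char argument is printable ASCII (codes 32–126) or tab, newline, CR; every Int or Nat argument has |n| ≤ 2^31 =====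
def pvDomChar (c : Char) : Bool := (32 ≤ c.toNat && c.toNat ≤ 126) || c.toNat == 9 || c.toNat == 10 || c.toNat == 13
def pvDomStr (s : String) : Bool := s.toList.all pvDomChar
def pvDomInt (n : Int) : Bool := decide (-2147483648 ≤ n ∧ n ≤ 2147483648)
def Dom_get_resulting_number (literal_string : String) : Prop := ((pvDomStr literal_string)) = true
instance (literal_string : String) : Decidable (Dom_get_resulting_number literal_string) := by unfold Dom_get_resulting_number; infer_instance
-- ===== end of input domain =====

-- B replaces A's single interleaved while loop by two passes: first find the index of the
-- terminating 5-bit group, then build the payload by joining the groups' data slices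
-- (objective: alternative decomposition, same cost).

-- ===== PORT A =====
-- loop state mirrors A: next_byte, (remaining) literal_string, resulting_number_string.
-- When next_byte is empty Python raises IndexError at next_byte[0]; these inputs are
-- outside Pre_ below, and the port just stops there.
def pvLoopA (nb rest res : List Char) : List Char × List Char :=
  if h : nb.head? = some '1' then  -- h used in decreasing_by
    pvLoopA (rest.take 5) (rest.drop 5) (res ++ nb.tail)
  else
    (res ++ nb.tail, rest)
termination_by nb.length + rest.length
decreasing_by
  have hnb : nb ≠ [] := by intro he; rw [he] at h; simp at h
  have h0 : 0 < nb.length := List.length_pos_iff.mpr hnb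
  have h1 := congrArg List.length (List.take_append_drop 5 rest)
  simp only [List.length_append] at h1
  omega

def get_resulting_number (literal_string : String) : String × String :=
  match pvLoopA (literal_string.toList.take 5) (literal_string.toList.drop 5) [] with
  | (res, rem) => (String.ofList res, String.ofList rem)

-- ===== PORT B =====
-- pass 1 of Source B: the while loop over k; literal_string[5*k] out of range → IndexError → none
def pvFindK (s : List Char) (k : Nat) : Option Nat :=
  if h : 5 * k < s.length then
    if s[5 * k] = '1' then pvFindK s (k + 1) else some k
  else none
termination_by s.length - 5 * k

def get_resulting_number_alt (literal_string : String) : String × String :=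
  match pvFindK literal_string.toList 0 with
  | none => ("", "")  -- Source B raises IndexError here; excluded by Pre_
  | some k =>
      (String.ofList ((List.range (k + 1)).foldl
          (fun acc i => acc ++ ((literal_string.toList.drop (5 * i + 1)).take 4)) []),
       String.ofList (literal_string.toList.drop (5 * (k + 1))))

-- ===== PRECONDITION & SPEC =====
-- Pre_ holds exactly when some 5-bit group (starting at index 5k) begins with a non-'1'
-- character, i.e. exactly when Python A returns instead of raising IndexError.
def Pre_get_resulting_number (literal_string : String) : Prop :=
  ∃ k < literal_string.toList.length,
    5 * k < literal_string.toList.length ∧ literal_string.toList.getD (5 * k) ' ' ≠ '1'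
instance (literal_string : String) : Decidable (Pre_get_resulting_number literal_string) := by
  unfold Pre_get_resulting_number; infer_instance

def pvWitness_get_resulting_number : String := "01111"

def Spec_get_resulting_number (literal_string : String) (out : String × String) : Prop := out = get_resulting_number_alt literal_string
instance (literal_string : String) (out : String × String) : Decidable (Spec_get_resulting_number literal_string out) := by unfold Spec_get_resulting_number; infer_instance

-- ===== CLAIM (what is proved, stated in full; the proofs are below) =====
def Claim_equal_get_resulting_number : Prop := ∀ (literal_string : String), Dom_get_resulting_number literal_string → Pre_get_resulting_number literal_string → Spec_get_resulting_number literal_string (get_resulting_number literal_string)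

-- ===== LEMMAS AND PROOFS =====

-- B's payload fold is the flattening of the groups' data slices
lemma pvFoldl_append {α β : Type} (f : β → List α) :
    ∀ (l : List β) (acc : List α),
      l.foldl (fun a i => a ++ f i) acc = acc ++ (l.map f).flatten := by
  intro l
  induction l with
  | nil => simp
  | cons b t ih => intro acc; simp [List.foldl_cons, ih, List.append_assoc]

def pvPayload (s : List Char) (k : Nat) : List Char :=
  (List.range (k + 1)).foldl (fun acc i => acc ++ ((s.drop (5 * i + 1)).take 4)) []

lemma pvPayload_succ (s : List Char) (k : Nat) :
    pvPayload s (k + 1) = (s.drop 1).take 4 ++ pvPayload (s.drop 5) k := by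
  have hgroup : ∀ i : Nat, ((s.drop 5).drop (5 * i + 1)).take 4 = (s.drop (5 * (i + 1) + 1)).take 4 := by
    intro i
    rw [List.drop_drop, show 5 + (5 * i + 1) = 5 * (i + 1) + 1 from by omega]
  simp only [pvPayload, pvFoldl_append, List.nil_append]
  rw [List.range_succ_eq_map]
  simp only [List.map_cons, List.flatten_cons, List.map_map, Function.comp_def, hgroup]

lemma pvFindK_shift :
    ∀ (m : Nat) (s : List Char) (k : Nat), s.length - 5 * (k + 1) ≤ m →
      pvFindK s (k + 1) = (pvFindK (s.drop 5) k).map (· + 1) := by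
  intro m
  induction m with
  | zero =>
      intro s k hm
      have h1 : ¬ 5 * (k + 1) < s.length := by omega
      have h2 : ¬ 5 * k < (s.drop 5).length := by simp [List.length_drop]; omega
      rw [pvFindK]
      conv_rhs => rw [pvFindK]
      rw [dif_neg h1, dif_neg h2]
      simp
  | succ n ih =>
      intro s k hm
      rw [pvFindK]
      conv_rhs => rw [pvFindK]
      by_cases h1 : 5 * (k + 1) < s.length
      · have h2 : 5 * k < (s.drop 5).length := by simp [List.length_drop]; omega
        rw [dif_pos h1, dif_pos h2]
        have hget : (s.drop 5)[5 * k]'h2 = s[5 * (k + 1)]'h1 := by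
          rw [List.getElem_drop]; congr 1; omega
        rw [hget]
        by_cases hc : s[5 * (k + 1)]'h1 = '1'
        · rw [if_pos hc, if_pos hc]
          exact ih s (k + 1) (by omega)
        · rw [if_neg hc, if_neg hc]; simp
      · have h2 : ¬ 5 * k < (s.drop 5).length := by simp [List.length_drop]; omega
        rw [dif_neg h1, dif_neg h2]; simp

lemma pvFindK_shift' (s : List Char) (k : Nat) :
    pvFindK s (k + 1) = (pvFindK (s.drop 5) k).map (· + 1) :=
  pvFindK_shift (s.length - 5 * (k + 1)) s k le_rfl

lemma pvTail_take (s : List Char) : (s.take 5).tail = (s.drop 1).take 4 := by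
  cases s <;> simp

-- main invariant: whenever pass 1 of B finds the terminating group k, A's loop produces
-- exactly B's payload and remainder.
lemma pvLoopA_eq :
    ∀ (m : Nat) (s res : List Char) (k : Nat), s.length ≤ m →
      pvFindK s 0 = some k →
      pvLoopA (s.take 5) (s.drop 5) res = (res ++ pvPayload s k, s.drop (5 * (k + 1))) := by
  intro m
  induction m with
  | zero =>
      intro s res k hm hk
      have hs : s = [] := List.eq_nil_of_length_eq_zero (by omega)
      subst hs
      rw [pvFindK] at hk
      simp at hk
  | succ n ih =>
      intro s res k hm hk
      rcases s with _ | ⟨c, t⟩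
      · rw [pvFindK] at hk; simp at hk
      · rw [pvFindK] at hk
        have hlt : 5 * 0 < (c :: t).length := by simp
        rw [dif_pos hlt] at hk
        have hget : (c :: t)[5 * 0]'hlt = c := by simp
        rw [hget] at hk
        by_cases hc : c = '1'
        · rw [if_pos hc] at hk
          rw [pvFindK_shift'] at hk
          rcases hk2 : pvFindK ((c :: t).drop 5) 0 with _ | k'
          · rw [hk2] at hk; simp at hk
          · rw [hk2] at hk
            simp only [Option.map_some] at hk
            rw [pvLoopA]
            have hhead : ((c :: t).take 5).head? = some '1' := by simp [hc]
            rw [dif_pos hhead]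
            have hlen : ((c :: t).drop 5).length ≤ n := by
              simp only [List.length_drop, List.length_cons] at *; omega
            rw [ih ((c :: t).drop 5) (res ++ ((c :: t).take 5).tail) k' hlen hk2]
            have hk3 : k = k' + 1 := by simpa using hk.symm
            subst hk3
            rw [pvPayload_succ, pvTail_take, List.drop_drop, List.append_assoc,
              show 5 + 5 * (k' + 1) = 5 * (k' + 1 + 1) from by omega]
        · rw [if_neg hc] at hk
          have hk0 : k = 0 := by simpa using hk.symm
          subst hk0
          rw [pvLoopA]
          have hhead : ((c :: t).take 5).head? ≠ some '1' := by simp [hc]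
          rw [dif_neg hhead]
          rw [pvTail_take]
          have hp0 : pvPayload (c :: t) 0 = ((c :: t).drop 1).take 4 := by
            simp [pvPayload, List.range_succ]
          rw [hp0]

-- Pre_ implies pass 1 of B succeeds
lemma pvFindK_isSome :
    ∀ (m : Nat) (s : List Char) (k0 : Nat), s.length - 5 * k0 ≤ m →
      (∃ j, k0 ≤ j ∧ 5 * j < s.length ∧ s.getD (5 * j) ' ' ≠ '1') →
      (pvFindK s k0).isSome := by
  intro m
  induction m with
  | zero =>
      intro s k0 hm hex
      obtain ⟨j, hj1, hj2, _⟩ := hex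
      omega
  | succ n ih =>
      intro s k0 hm hex
      obtain ⟨j, hj1, hj2, hj3⟩ := hex
      rw [pvFindK]
      by_cases hlt : 5 * k0 < s.length
      · rw [dif_pos hlt]
        by_cases hc : s[5 * k0]'hlt = '1'
        · rw [if_pos hc]
          have hne : j ≠ k0 := by
            intro he; subst he
            apply hj3
            rw [List.getD_eq_getElem?_getD, List.getElem?_eq_getElem hlt]
            simpa using hc
          exact ih s (k0 + 1) (by omega) ⟨j, by omega, hj2, hj3⟩
        · rw [if_neg hc]; rfl
      · omega

-- ===== VERDICT (by name: the statement is the Claim_ definition above) =====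
theorem get_resulting_number_spec : Claim_equal_get_resulting_number := by
  intro s _ hpre
  obtain ⟨j, _, hj2, hj3⟩ := hpre
  have hsome : (pvFindK s.toList 0).isSome :=
    pvFindK_isSome s.toList.length s.toList 0 (by omega) ⟨j, Nat.zero_le _, hj2, hj3⟩
  obtain ⟨k, hk⟩ := Option.isSome_iff_exists.mp hsome
  unfold Spec_get_resulting_number get_resulting_number get_resulting_number_alt
  rw [hk, pvLoopA_eq s.toList.length s.toList [] k le_rfl hk]
  simp [pvPayload]
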